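-- pv_equiv track=rewrite | github.com/pypi-data/pypi-mirror-68 | packages/wpkit/wpkit-1.1.2.1-py3-none-any.whl/wpkit/cv/color.py | _finetune_result
-- ===== SOURCE A (Python) =====
-- def _finetune_result(sums):
--     sums = [(c, num) for c, num in sums.items()]
--     sums.sort(key=lambda x: x[1], reverse=True)
--     first,second=sums[:2]
--     if first[0]=='black':
--         if first[1]>=second[1]*3:
--             return first[0]
--         else:
--             return second[0]
--     else:
--         return first[0]
-- ===== SOURCE B (Python) =====
-- def _finetune_result(sums):
--     items = [(c, num) for c, num in sums.items()]
--     first = max(items, key=lambda x: x[1])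
--     items.remove(first)
--     second = max(items, key=lambda x: x[1])
--     if first[0] == 'black':
--         if first[1] >= second[1] * 3:
--             return first[0]
--         return second[0]
--     return first[0]
-- ===== Notes on version B (the rewrite author's own statement) =====
-- stated objective: alternative
-- what changed: Replaces the descending stable sort of the item list by two linear selection scans: first = max by count (Python's max returns the first maximal element, matching the stable sort's head), remove that tuple, second = max of the rest; the decision logic on (first, second) is unchanged.
import Mathlib
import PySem

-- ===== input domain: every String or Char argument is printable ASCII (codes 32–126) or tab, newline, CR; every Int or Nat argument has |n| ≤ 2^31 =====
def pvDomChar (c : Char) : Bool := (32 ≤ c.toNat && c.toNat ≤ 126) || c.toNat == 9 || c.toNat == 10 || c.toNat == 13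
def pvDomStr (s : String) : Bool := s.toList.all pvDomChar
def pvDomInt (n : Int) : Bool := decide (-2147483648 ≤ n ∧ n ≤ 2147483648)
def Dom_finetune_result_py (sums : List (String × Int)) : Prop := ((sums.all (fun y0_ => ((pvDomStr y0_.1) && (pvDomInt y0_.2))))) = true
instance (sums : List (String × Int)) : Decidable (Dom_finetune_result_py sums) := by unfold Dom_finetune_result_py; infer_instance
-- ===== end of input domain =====

-- B replaces A's descending stable sort by two linear max-scans (first maximal, remove it, max of the rest): a different selection algorithm of similar measured cost.


-- ===== PORT A =====
-- sums.items() is the association list itself; sort by count, reverse=True (stable);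
-- 'first, second = sums[:2]' = the first two elements (raises ValueError when there are fewer than two; excluded by Pre_).
def finetune_result_py (sums : List (String × Int)) : String :=
  match PySem.List.sorted sums (fun x => x.2) true with
  | first :: second :: _ =>
      if first.1 == "black" then
        if first.2 ≥ second.2 * 3 then first.1 else second.1
      else first.1
  | _ => ""   -- unreachable under Pre_ (fewer than two items: Python raises ValueError)

-- ===== PORT B =====
-- first = max(items, key=count) (first maximal); items.remove(first); second = max(rest, key=count).
def finetune_result_py_alt (sums : List (String × Int)) : String :=
  match PySem.List.max? sums (fun x => x.2) with
  | none => ""   -- max of an empty sequence raises ValueError; excluded by Pre_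
  | some first =>
    match PySem.List.remove? sums first with
    | none => ""   -- unreachable: first ∈ sums
    | some rest =>
      match PySem.List.max? rest (fun x => x.2) with
      | none => ""   -- only one item: second max raises ValueError; excluded by Pre_
      | some second =>
        if first.1 == "black" then
          if first.2 ≥ second.2 * 3 then first.1 else second.1
        else first.1

-- ===== PRECONDITION & SPEC =====
-- sums is a Python dict, so its keys are pairwise distinct (a duplicate-key association list
-- represents no dict); with fewer than two items 'first, second = sums[:2]' raises ValueError.
def Pre_finetune_result_py (sums : List (String × Int)) : Prop :=
  2 ≤ sums.length ∧ (sums.map Prod.fst).Nodup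
instance (sums : List (String × Int)) : Decidable (Pre_finetune_result_py sums) := by
  unfold Pre_finetune_result_py; infer_instance

def pvWitness_finetune_result_py : (List (String × Int)) := [("black", 9), ("white", 2)]

def Spec_finetune_result_py (sums : List (String × Int)) (out : String) : Prop := out = finetune_result_py_alt sums
instance (sums : List (String × Int)) (out : String) : Decidable (Spec_finetune_result_py sums out) := by unfold Spec_finetune_result_py; infer_instance

-- ===== CLAIM (what is proved, stated in full; the proofs are below) =====
def Claim_equal_finetune_result_py : Prop := ∀ (sums : List (String × Int)), Dom_finetune_result_py sums → Pre_finetune_result_py sums → Spec_finetune_result_py sums (finetune_result_py sums)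

-- ===== LEMMAS AND PROOFS =====

-- sorting one more element = insert it into the sorted list
lemma sorted_rev_append_singleton (xs : List (String × Int)) (x : String × Int) :
    PySem.List.sorted (xs ++ [x]) (fun p => p.2) true =
      PySem.List.insertBy (fun a b => decide ((b : String × Int).2 < a.2)) x
        (PySem.List.sorted xs (fun p => p.2) true) := by
  rw [PySem.List.sorted_rev_eq_foldl_insertBy, PySem.List.sorted_rev_eq_foldl_insertBy,
      List.foldl_append]
  rfl

-- the running max over one more element (empty and nonempty prefix)
lemma max?_append_singleton_none (xs : List (String × Int)) (x : String × Int)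
    (hm : PySem.List.max? xs (fun p => p.2) = none) :
    PySem.List.max? (xs ++ [x]) (fun p => p.2) = some x := by
  unfold PySem.List.max? at hm ⊢
  rw [List.foldl_append, hm]
  rfl

lemma max?_append_singleton_some (xs : List (String × Int)) (x m : String × Int)
    (hm : PySem.List.max? xs (fun p => p.2) = some m) :
    PySem.List.max? (xs ++ [x]) (fun p => p.2) =
      if m.2 < x.2 then some x else some m := by
  unfold PySem.List.max? at hm ⊢
  rw [List.foldl_append, hm]
  rfl

-- the head of the descending stable sort is the FIRST maximal element (Python's max),
-- and the tail is the sort of the list with that element removed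
lemma sorted_rev_cons_max (xs : List (String × Int)) (m : String × Int)
    (h : PySem.List.max? xs (fun p => p.2) = some m) :
    PySem.List.sorted xs (fun p => p.2) true =
      m :: PySem.List.sorted (xs.erase m) (fun p => p.2) true := by
  induction xs using List.reverseRecOn with
  | nil => simp [PySem.List.max?] at h
  | append_singleton xs x ih =>
    rw [sorted_rev_append_singleton]
    cases hm : PySem.List.max? xs (fun p => p.2) with
    | none =>
      -- xs is empty
      have hxs : xs = [] := (PySem.List.max?_eq_none_iff _ _).mp hm
      subst hxs
      rw [max?_append_singleton_none _ _ hm] at h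
      injection h with h; subst h
      simp [PySem.List.sorted, PySem.List.insertBy]
    | some m0 =>
      rw [max?_append_singleton_some _ _ _ hm] at h
      by_cases hlt : m0.2 < x.2
      · -- x is the new (strict) maximum: it goes to the front, and x ∉ xs
        rw [if_pos hlt] at h
        injection h with h; subst h
        have hx_not : x ∉ xs := by
          intro hmem
          exact absurd (PySem.List.max?_isMax hm x hmem) (not_le.mpr hlt)
        have herase : (xs ++ [x]).erase x = xs := by
          rw [List.erase_append_right _ hx_not]; simp
        rw [herase]
        -- insertBy puts x at the front since every key in sorted xs is ≤ m0.2 < x.2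
        cases hs : PySem.List.sorted xs (fun p => p.2) true with
        | nil =>
          have : xs = [] := (PySem.List.sorted_eq_nil_iff _ _ _).mp hs
          subst this
          simp [PySem.List.insertBy] at hs ⊢
        | cons h0 t0 =>
          have hh0 : h0 ∈ xs := by
            have := PySem.List.mem_sorted (xs := xs) (key := fun p => p.2)
              (rev := true) (x := h0)
            rw [hs] at this; exact this.mp (by simp)
          have : h0.2 < x.2 := lt_of_le_of_lt (PySem.List.max?_isMax hm h0 hh0) hlt
          simp [PySem.List.insertBy, this]
      · -- the old first maximum m0 stays the maximum (ties keep the earlier element)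
        rw [if_neg hlt] at h
        injection h with h; subst h
        have hmem : m0 ∈ xs := PySem.List.max?_mem hm
        have herase : (xs ++ [x]).erase m0 = xs.erase m0 ++ [x] :=
          List.erase_append_left _ hmem
        rw [herase, ih hm, sorted_rev_append_singleton]
        simp [PySem.List.insertBy, hlt]

theorem finetune_result_py_spec : Claim_equal_finetune_result_py := by
  intro sums _hdom hpre
  obtain ⟨hlen, _hnodup⟩ := hpre
  unfold Spec_finetune_result_py
  -- sums is nonempty, so the first max exists
  cases h1 : PySem.List.max? sums (fun p => p.2) with
  | none =>
    have : sums = [] := (PySem.List.max?_eq_none_iff _ _).mp h1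
    subst this; simp at hlen
  | some first =>
    have hmem : first ∈ sums := PySem.List.max?_mem h1
    have hrem : PySem.List.remove? sums first = some (sums.erase first) :=
      PySem.List.remove?_eq_some_erase sums first hmem
    -- the remainder is nonempty, so the second max exists
    have hlen' : 1 ≤ (sums.erase first).length := by
      have := List.length_erase_of_mem hmem
      omega
    cases h2 : PySem.List.max? (sums.erase first) (fun p => p.2) with
    | none =>
      have : sums.erase first = [] := (PySem.List.max?_eq_none_iff _ _).mp h2
      rw [this] at hlen'; simp at hlen'
    | some second =>
      -- the sorted list starts with exactly (first, second, …)
      have hs1 := sorted_rev_cons_max sums first h1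
      have hs2 := sorted_rev_cons_max (sums.erase first) second h2
      rw [hs2] at hs1
      unfold finetune_result_py finetune_result_py_alt
      simp only [hs1, h1, hrem, h2]
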